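-- pv_equiv track=rewrite | github.com/starlight-traveler/franc-master-control | src/aprs/python/ax25.py | bit_stuffing
-- ===== SOURCE A (Python) =====
-- def bit_stuffing(data: list):
--     """
--     Convert the byte stream into a bit stream with bit stuffing.
--     Every 5 consecutive '1' bits gets followed by a '0' bit.
--     Returns a list of booleans.
--     """
--     result = []
--     count = 0
--     for b in data:
--         for _ in range(8):
--             bit = (b & 1) != 0
--             if bit:
--                 result.append(True)
--                 count += 1
--                 if count == 5:
--                     # Stuff a zero
--                     result.append(False)
--                     count = 0
--             else:
--                 result.append(False)
--                 count = 0
--             b >>= 1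
--     return result
-- ===== SOURCE B (Python) =====
-- def bit_stuffing(data: list):
--     """Bit stream with stuffing via string replace: every 5 consecutive
--     ones get a zero appended; '11111' -> '111110' left-to-right is exactly that."""
--     bits = [(b >> i) & 1 for b in data for i in range(8)]
--     s = ''.join('1' if bit else '0' for bit in bits)
--     s = s.replace('11111', '111110')
--     return [c == '1' for c in s]
-- ===== Notes on version B (the rewrite author's own statement) =====
-- stated objective: idiomatic
-- what changed: Replaces the fused per-bit counter loop by two phases: flatten all bytes to a '0'/'1' string, then perform the stuffing as a single left-to-right str.replace('11111','111110'), which is exactly 'a zero after every 5 consecutive ones'.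
import Mathlib
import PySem

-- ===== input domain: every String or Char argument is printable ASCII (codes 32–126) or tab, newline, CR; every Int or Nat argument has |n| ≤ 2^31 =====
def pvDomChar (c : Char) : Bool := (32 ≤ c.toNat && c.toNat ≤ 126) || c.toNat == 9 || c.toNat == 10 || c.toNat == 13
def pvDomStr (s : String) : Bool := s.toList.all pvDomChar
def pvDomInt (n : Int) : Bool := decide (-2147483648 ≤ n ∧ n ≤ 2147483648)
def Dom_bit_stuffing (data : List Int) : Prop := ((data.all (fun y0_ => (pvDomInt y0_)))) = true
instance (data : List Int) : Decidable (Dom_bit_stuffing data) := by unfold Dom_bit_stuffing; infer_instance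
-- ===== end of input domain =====

-- B replaces the fused per-bit counter loop by two phases: flatten to a 0/1 string,
-- then do the stuffing as one left-to-right '11111' -> '111110' string replace (idiomatic).

-- ===== PORT A =====
-- literal transliteration of A: nested loops, state (result, count), b shifted in place
def bit_stuffing (data : List Int) : List Bool :=
  (data.foldl
    (fun (s : List Bool × Int) b =>
      ((List.range 8).foldl
        (fun (t : (List Bool × Int) × Int) _ =>
          let bit : Bool := PySem.Int.band t.2 1 != 0
          let s' :=
            if bit then
              let res := t.1.1 ++ [true]
              let count := t.1.2 + 1
              if count == 5 then (res ++ [false], (0 : Int)) else (res, count)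
            else (t.1.1 ++ [false], (0 : Int))
          (s', t.2 >>> (1 : Nat)))
        (s, b)).1)
    ([], 0)).1

-- ===== PORT B =====
-- transliteration of Source B; ''.join over single chars and str.replace are ported on the
-- character-list side (PySem.Chars.replace), exact for these ASCII characters
def bit_stuffing_alt (data : List Int) : List Bool :=
  let bits := data.flatMap (fun b => (List.range 8).map (fun i => PySem.Int.band (b >>> i) 1))
  let s := bits.map (fun bit => if bit != 0 then '1' else '0')
  let s2 := PySem.Chars.replace s ['1', '1', '1', '1', '1'] ['1', '1', '1', '1', '1', '0']
  s2.map (fun c => c == '1')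

-- ===== PRECONDITION & SPEC =====
def Spec_bit_stuffing (data : List Int) (out : List Bool) : Prop := out = bit_stuffing_alt data
instance (data : List Int) (out : List Bool) : Decidable (Spec_bit_stuffing data out) := by unfold Spec_bit_stuffing; infer_instance

-- ===== CLAIM (what is proved, stated in full; the proofs are below) =====
def Claim_equal_bit_stuffing : Prop := ∀ (data : List Int), Dom_bit_stuffing data → Spec_bit_stuffing data (bit_stuffing data)

-- ===== LEMMAS AND PROOFS =====

-- the stuffing pass as one structural recursion with an explicit ones-counter
def stuffC : Nat → List Bool → List Bool
  | _, [] => []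
  | _, false :: t => false :: stuffC 0 t
  | c, true :: t => if c = 4 then true :: false :: stuffC 0 t else true :: stuffC (c + 1) t

-- A's loop body on one bit
def stepA (s : List Bool × Int) (bit : Bool) : List Bool × Int :=
  if bit then
    let res := s.1 ++ [true]
    let count := s.2 + 1
    if count == 5 then (res ++ [false], (0 : Int)) else (res, count)
  else (s.1 ++ [false], (0 : Int))

-- the n low bits of b, LSB first
def bitsN (n : Nat) (b : Int) : List Bool :=
  (List.range n).map (fun i => PySem.Int.band (Int.shiftRight b i) 1 != 0)

def chB (b : Bool) : Char := if b then '1' else '0'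

lemma shift_comp (b : Int) (n : Nat) : (b >>> n) >>> (1 : Nat) = b >>> (n + 1) := by
  rw [Int.shiftRight_eq_div_pow, Int.shiftRight_eq_div_pow, Int.shiftRight_eq_div_pow, pow_succ]
  rw [Int.ediv_ediv_of_nonneg (by positivity)]
  push_cast; ring_nf

lemma innerA (n : Nat) (b : Int) (s : List Bool × Int) :
    (List.range n).foldl
        (fun (t : (List Bool × Int) × Int) _ =>
          let bit : Bool := PySem.Int.band t.2 1 != 0
          let s' :=
            if bit then
              let res := t.1.1 ++ [true]
              let count := t.1.2 + 1
              if count == 5 then (res ++ [false], (0 : Int)) else (res, count)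
            else (t.1.1 ++ [false], (0 : Int))
          (s', t.2 >>> (1 : Nat)))
        (s, b)
      = ((bitsN n b).foldl stepA s, b >>> n) := by
  induction n with
  | zero => simp [bitsN]
  | succ n ih =>
      rw [List.range_succ, List.foldl_append, ih, List.foldl_cons, List.foldl_nil]
      have hb : bitsN (n + 1) b = bitsN n b ++ [PySem.Int.band (b >>> n) 1 != 0] := by
        simp [bitsN, List.range_succ, ← Int.shiftRight_eq]
      rw [hb, List.foldl_append, List.foldl_cons, List.foldl_nil, shift_comp]
      rfl

lemma outerA (data : List Int) (s : List Bool × Int) :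
    data.foldl
        (fun (s : List Bool × Int) b =>
          ((List.range 8).foldl
            (fun (t : (List Bool × Int) × Int) _ =>
              let bit : Bool := PySem.Int.band t.2 1 != 0
              let s' :=
                if bit then
                  let res := t.1.1 ++ [true]
                  let count := t.1.2 + 1
                  if count == 5 then (res ++ [false], (0 : Int)) else (res, count)
                else (t.1.1 ++ [false], (0 : Int))
              (s', t.2 >>> (1 : Nat)))
            (s, b)).1)
        s
      = (data.flatMap (bitsN 8)).foldl stepA s := by
  induction data generalizing s with
  | nil => simp
  | cons b rest ih =>
      rw [List.flatMap_cons, List.foldl_append, List.foldl_cons, innerA 8 b s, ih]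

lemma foldl_stepA_eq (l : List Bool) (res : List Bool) (cnt : Int)
    (h0 : 0 ≤ cnt) (h4 : cnt ≤ 4) :
    (l.foldl stepA (res, cnt)).1 = res ++ stuffC cnt.toNat l := by
  induction l generalizing res cnt with
  | nil => simp [stuffC]
  | cons bit t ih =>
      cases bit with
      | false =>
          rw [List.foldl_cons]
          show (t.foldl stepA (res ++ [false], 0)).1 = _
          rw [ih _ _ (le_refl 0) (by norm_num)]
          simp [stuffC]
      | true =>
          rw [List.foldl_cons]
          by_cases h5 : cnt + 1 = 5
          · have hc : cnt.toNat = 4 := by omega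
            show (t.foldl stepA (if (cnt + 1 == 5) = true then (res ++ [true] ++ [false], (0:Int)) else (res ++ [true], cnt + 1))).1 = _
            rw [if_pos (by simpa using h5)]
            rw [ih _ _ (le_refl 0) (by norm_num)]
            simp [stuffC, hc]
          · have hc : cnt.toNat ≠ 4 := by omega
            show (t.foldl stepA (if (cnt + 1 == 5) = true then (res ++ [true] ++ [false], (0:Int)) else (res ++ [true], cnt + 1))).1 = _
            rw [if_neg (by simpa using h5)]
            rw [ih _ _ (by omega) (by omega)]
            have : (cnt + 1).toNat = cnt.toNat + 1 := by omega
            simp [stuffC, hc, this]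

lemma map_chB_eq_replicate (x : List Bool) (k : Nat) :
    x.map chB = List.replicate k '1' ↔ x = List.replicate k true := by
  induction x generalizing k with
  | nil => cases k <;> simp
  | cons b t ih =>
      cases k with
      | zero => simp
      | succ k =>
          cases b <;> simp [chB, List.replicate_succ, ih]

-- one step of go on a non-matching head
lemma go_step (fuel : Nat) (c : Char) (t acc : List Char)
    (h : (['1','1','1','1','1'] : List Char).isPrefixOf (c :: t) = false) :
    PySem.Chars.replace.go ['1','1','1','1','1'] ['1','1','1','1','1','0'] (fuel + 1) (c :: t) acc
      = PySem.Chars.replace.go ['1','1','1','1','1'] ['1','1','1','1','1','0'] fuel t (c :: acc) := by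
  rw [PySem.Chars.replace.go]
  simp [h]

lemma goC (n : Nat) : ∀ (l : List Bool) (c : Nat) (acc : List Char) (fuel : Nat),
    l.length = n → c ≤ 4 → l.length ≤ fuel →
    (c = 0 ∨ l.take (5 - c) ≠ List.replicate (5 - c) true) →
    PySem.Chars.replace.go ['1','1','1','1','1'] ['1','1','1','1','1','0'] fuel (l.map chB) acc
      = acc.reverse ++ (stuffC c l).map chB := by
  induction n using Nat.strong_induction_on with
  | _ n IH =>
    intro l c acc fuel hn hc hfuel hinv
    cases l with
    | nil =>
        cases fuel with
        | zero => rw [PySem.Chars.replace.go]; simp [stuffC]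
        | succ f => simp only [List.map_nil]; rw [PySem.Chars.replace.go] <;> simp [stuffC]
    | cons b t =>
        cases fuel with
        | zero => simp at hfuel
        | succ f =>
            cases b with
            | false =>
                rw [List.map_cons, go_step f (chB false) (t.map chB) acc (by simp [chB, List.isPrefixOf])]
                rw [IH t.length (by simp at hn; omega) t 0 (chB false :: acc) f rfl (by norm_num)
                      (by simp at hn hfuel ⊢; omega) (Or.inl rfl)]
                simp [stuffC, chB]
            | true =>
                by_cases h4 : c = 4
                · rcases hinv with h0 | hne
                  · omega
                  · exact absurd (by rw [h4]; rfl) hne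
                · by_cases hp : (true :: t).take 5 = List.replicate 5 true
                  · -- five ones ahead: go matches the pattern and stuffs
                    have hc0 : c = 0 := by
                      rcases hinv with h0 | hne
                      · exact h0
                      · exfalso; apply hne
                        calc (true :: t).take (5 - c)
                            = ((true :: t).take 5).take (5 - c) := by
                              rw [List.take_take]; congr 1; omega
                          _ = (List.replicate 5 true).take (5 - c) := by rw [hp]
                          _ = List.replicate (5 - c) true := by
                              rw [List.take_replicate]; congr 1; omega
                    subst hc0
                    have ht4 : t.take 4 = List.replicate 4 true := by
                      simpa [List.take_succ_cons, List.replicate_succ] using hp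
                    have ht : t = true :: true :: true :: true :: t.drop 4 := by
                      conv_lhs => rw [← List.take_append_drop 4 t]
                      rw [ht4]; rfl
                    have hlen : 4 ≤ t.length := by
                      have := congrArg List.length ht4
                      simp at this; omega
                    have hpre : (['1','1','1','1','1'] : List Char).isPrefixOf
                        ((true :: t).map chB) = true := by
                      conv_lhs => rw [ht]
                      simp [chB, List.isPrefixOf]
                    rw [List.map_cons] at hpre ⊢
                    rw [PySem.Chars.replace.go]
                    simp only [hpre, if_true]
                    have hdrop : List.drop (List.length (['1','1','1','1','1'] : List Char))
                        (chB true :: List.map chB t) = (t.drop 4).map chB := by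
                      conv_lhs => rw [ht]
                      simp [chB]
                    rw [hdrop]
                    have hrlen : (t.drop 4).length = n - 5 := by
                      simp at hn ⊢; omega
                    rw [IH (t.drop 4).length (by simp at hn; omega) (t.drop 4)
                          0 (List.reverse ['1','1','1','1','1','0'] ++ acc) f rfl (by norm_num)
                          (by simp at hn hfuel ⊢; omega) (Or.inl rfl)]
                    conv_rhs => rw [ht]
                    simp [stuffC, chB]
                  · -- fewer than five ones ahead: go walks over this '1'
                    have H : (true :: t).take (5 - c) ≠ List.replicate (5 - c) true := by
                      rcases hinv with h0 | hne
                      · subst h0; simpa using hp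
                      · exact hne
                    have hpre : (['1','1','1','1','1'] : List Char).isPrefixOf
                        ((true :: t).map chB) = false := by
                      cases hb : (['1','1','1','1','1'] : List Char).isPrefixOf
                          ((true :: t).map chB) with
                      | false => rfl
                      | true =>
                          exfalso; apply hp
                          have hpr := List.prefix_iff_eq_take.mp (List.isPrefixOf_iff_prefix.mp hb)
                          rw [← List.map_take] at hpr
                          exact (map_chB_eq_replicate _ 5).mp hpr.symm
                    rw [List.map_cons, go_step f (chB true) (t.map chB) acc
                          (by rw [← List.map_cons]; exact hpre)]
                    have hinv' : t.take (5 - (c + 1)) ≠ List.replicate (5 - (c + 1)) true := by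
                      intro heq; apply H
                      have h5c : 5 - c = (5 - (c + 1)) + 1 := by omega
                      rw [h5c, List.take_succ_cons, List.replicate_succ, heq]
                    rw [IH t.length (by simp at hn; omega) t (c + 1) (chB true :: acc) f rfl (by omega)
                          (by simp at hn hfuel ⊢; omega) (Or.inr hinv')]
                    simp [stuffC, chB, h4]

lemma replace_eq (L : List Bool) :
    PySem.Chars.replace (L.map chB) ['1','1','1','1','1'] ['1','1','1','1','1','0']
      = (stuffC 0 L).map chB := by
  rw [PySem.Chars.replace, if_neg (by decide)]
  rw [goC L.length L 0 [] (L.map chB).length rfl (by norm_num) (by simp) (Or.inl rfl)]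
  simp

-- ===== VERDICT (by name: the statement is the Claim_ definition above) =====
lemma A_eq_stuff (data : List Int) :
    bit_stuffing data = stuffC 0 (data.flatMap (bitsN 8)) := by
  unfold bit_stuffing
  rw [outerA data ([], 0), foldl_stepA_eq _ _ 0 le_rfl (by norm_num)]
  simp

lemma map_chB_cancel (x : List Bool) : (x.map chB).map (fun c => c == '1') = x := by
  have h : ((fun c => c == '1') ∘ chB) = id := funext (fun b => by cases b <;> rfl)
  rw [List.map_map, h, List.map_id]

lemma B_eq_stuff (data : List Int) :
    bit_stuffing_alt data = stuffC 0 (data.flatMap (bitsN 8)) := by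
  simp only [bit_stuffing_alt]
  have hmap : (data.flatMap (fun b => (List.range 8).map
        (fun i => PySem.Int.band (b >>> i) 1))).map (fun bit => if bit != 0 then '1' else '0')
      = (data.flatMap (bitsN 8)).map chB := by
    simp only [List.map_flatMap, bitsN, List.map_map, ← Int.shiftRight_eq]
    rfl
  rw [hmap, replace_eq, map_chB_cancel]

theorem bit_stuffing_spec : Claim_equal_bit_stuffing := by
  intro data _
  unfold Spec_bit_stuffing
  rw [A_eq_stuff, B_eq_stuff]
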